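-- pv_equiv track=rewrite | github.com/sisinflab/DataRec | datarec/data/utils.py | popularity
-- ===== SOURCE A (Python) =====
-- def popularity(quartiles: dict):
--     """
--     Categorizes items based on their quartile indices.
--
--     Converts quartile indices (0-3) into descriptive popularity categories:
--         0 -> 'long tail'
--         1 -> 'common'
--         2 -> 'popular'
--         3 -> 'most popular'
--
--     Args:
--         quartiles (dict): A dictionary mapping items to quartile indices (0-3).
--
--     Returns:
--         (dict): A dictionary mapping each popularity category to a list of items.
--     """
--     categories_map = \
--         {3: 'most popular',
--          2: 'popular',
--          1: 'common',
--          0: 'long tail'}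
--
--     categories = \
--         {'most popular': [],
--          'popular': [],
--          'common': [],
--          'long tail': []}
--
--     for k, q in quartiles.items():
--         categories[categories_map[q]].append(k)
--
--     return categories
-- ===== SOURCE B (Python) =====
-- def popularity(quartiles: dict):
--     """Same result as A, built category-by-category: one filtering pass per
--     category (selecting the items whose quartile maps to that category name)
--     instead of A's single scatter-append pass; names[q] raises KeyError on a
--     quartile outside 0-3 exactly as A's categories_map[q] does."""
--     names = {3: 'most popular', 2: 'popular', 1: 'common', 0: 'long tail'}
--     return {name: [k for k, q in quartiles.items() if names[q] == name]
--             for name in names.values()}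
-- ===== Notes on version B (the rewrite author's own statement) =====
-- stated objective: alternative
-- what changed: replaced A's single scatter-append pass into a pre-built category dict by a dict comprehension that builds each of the four categories with its own filtering pass over the items (mapping each quartile to its name and comparing)
import Mathlib
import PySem

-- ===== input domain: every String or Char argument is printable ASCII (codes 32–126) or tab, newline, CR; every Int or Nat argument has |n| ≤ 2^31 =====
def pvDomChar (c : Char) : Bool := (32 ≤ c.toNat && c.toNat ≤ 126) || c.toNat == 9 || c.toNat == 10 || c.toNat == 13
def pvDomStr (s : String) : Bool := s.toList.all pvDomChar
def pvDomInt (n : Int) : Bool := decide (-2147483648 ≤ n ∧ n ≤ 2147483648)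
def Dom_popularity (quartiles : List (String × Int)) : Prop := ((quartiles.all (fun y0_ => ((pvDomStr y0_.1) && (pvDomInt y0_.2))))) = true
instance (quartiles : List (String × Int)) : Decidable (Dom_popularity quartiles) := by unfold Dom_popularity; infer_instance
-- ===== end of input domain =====

-- B builds each of the four categories with its own filtering pass (a dict comprehension)
-- instead of A's single scatter-append pass over a pre-built category dict; same return
-- value for quartile values in 0..3 (outside that range A raises KeyError: Pre_).


-- ===== PORT A =====
-- categories_map = {3: 'most popular', 2: 'popular', 1: 'common', 0: 'long tail'}
def catsMapA : PySem.Dict Int String :=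
  PySem.Dict.ofList [(3, "most popular"), (2, "popular"), (1, "common"), (0, "long tail")]

-- categories = {'most popular': [], 'popular': [], 'common': [], 'long tail': []}
def initCats : PySem.Dict String (List String) :=
  PySem.Dict.ofList [("most popular", []), ("popular", []), ("common", []), ("long tail", [])]

def popularity (quartiles : List (String × Int)) : List (String × List String) :=
  -- for k, q in quartiles.items(): categories[categories_map[q]].append(k)
  let categories := quartiles.foldl (fun cats kv =>
    match catsMapA.get? kv.2 with
    | some name => cats.modify name [] (fun l => l ++ [kv.1])  -- name is always a key of categories
    | none => cats)   -- KeyError in Python; excluded by Pre_popularity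
    initCats
  categories.items

-- ===== PORT B =====
-- names = {3: 'most popular', 2: 'popular', 1: 'common', 0: 'long tail'}
def catsMapB : PySem.Dict Int String :=
  PySem.Dict.ofList [(3, "most popular"), (2, "popular"), (1, "common"), (0, "long tail")]

def popularity_alt (quartiles : List (String × Int)) : List (String × List String) :=
  -- {name: [k for k, q in quartiles.items() if names[q] == name] for name in names.values()}
  -- names[q] raises KeyError outside 0..3 (excluded by Pre_popularity); on 0..3 getD _ ""
  -- agrees with the lookup, and "" is never a category name
  catsMapB.values.map (fun name =>
    (name, (quartiles.filter (fun kv => catsMapB.getD kv.2 "" == name)).map (·.1)))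

-- ===== PRECONDITION & SPEC =====
-- Pre_: every quartile value is 0..3; outside it, A's categories_map[q] raises KeyError.
def Pre_popularity (quartiles : List (String × Int)) : Prop :=
  ∀ kv ∈ quartiles, kv.2 = 0 ∨ kv.2 = 1 ∨ kv.2 = 2 ∨ kv.2 = 3
instance (quartiles : List (String × Int)) : Decidable (Pre_popularity quartiles) := by
  unfold Pre_popularity; infer_instance

def pvWitness_popularity : (List (String × Int)) :=
  [("a", 0), ("b", 3), ("c", 1), ("d", 3), ("e", 2)]

def Spec_popularity (quartiles : List (String × Int)) (out : List (String × List String)) : Prop := out = popularity_alt quartiles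
instance (quartiles : List (String × Int)) (out : List (String × List String)) : Decidable (Spec_popularity quartiles out) := by unfold Spec_popularity; infer_instance

-- ===== CLAIM (what is proved, stated in full; the proofs are below) =====
def Claim_equal_popularity : Prop := ∀ (quartiles : List (String × Int)), Dom_popularity quartiles → Pre_popularity quartiles → Spec_popularity quartiles (popularity quartiles)

-- ===== LEMMAS AND PROOFS =====

-- total form of A's lookup categories_map[q] (agrees with it on q ∈ 0..3)
def nameOf (q : Int) : String :=
  if q = 3 then "most popular" else if q = 2 then "popular" else if q = 1 then "common" else "long tail"

theorem get?_catsMapA (q : Int) (h : q = 0 ∨ q = 1 ∨ q = 2 ∨ q = 3) :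
    catsMapA.get? q = some (nameOf q) := by
  rcases h with h | h | h | h <;> subst h <;> decide

theorem get?_catsMapB (q : Int) (h : q = 0 ∨ q = 1 ∨ q = 2 ∨ q = 3) :
    catsMapB.get? q = some (nameOf q) := by
  rcases h with h | h | h | h <;> subst h <;> decide

theorem popularity_main (qs : List (String × Int))
    (hpre : ∀ kv ∈ qs, kv.2 = 0 ∨ kv.2 = 1 ∨ kv.2 = 2 ∨ kv.2 = 3) :
    (qs.foldl (fun cats kv =>
      match catsMapA.get? kv.2 with
      | some name => cats.modify name [] (fun l => l ++ [kv.1])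
      | none => cats) initCats).items
    = catsMapB.values.map (fun name =>
        (name, (qs.filter (fun kv => catsMapB.getD kv.2 "" == name)).map (·.1))) := by
  have h1 : qs.foldl (fun cats kv =>
      match catsMapA.get? kv.2 with
      | some name => cats.modify name [] (fun l => l ++ [kv.1])
      | none => cats) initCats
    = qs.foldl (fun cats kv => cats.modify (nameOf kv.2) [] (fun l => l ++ [kv.1])) initCats := by
    apply PySem.List.foldl_congr_mem
    intro acc kv hkv
    rw [get?_catsMapA kv.2 (hpre kv hkv)]
  rw [h1]
  set D := qs.foldl (fun cats kv => cats.modify (nameOf kv.2) [] (fun l => l ++ [kv.1])) initCats with hD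
  have hkeys : D.keys = initCats.keys := by
    rw [hD, PySem.Dict.keys_foldl_modify_key]
    rw [PySem.Set.update_eq_append_filter]
    have : (PySem.Set.ofList (qs.map fun kv => nameOf kv.2)).filter
        (fun y => !(PySem.Set.contains initCats.keys y)) = [] := by
      rw [List.filter_eq_nil_iff]
      intro a ha
      rw [PySem.Set.mem_ofList] at ha
      obtain ⟨kv, -, hkv⟩ := List.mem_map.mp ha
      subst hkv
      simp [nameOf, initCats]
      split_ifs <;> decide
    rw [this, List.append_nil]
  have hnd : D.keys.Nodup := by rw [hkeys]; decide
  have hgetD : ∀ c, D.getD c [] = initCats.getD c [] ++ ((qs.map (fun kv => (nameOf kv.2, kv.1))).filter (fun p => p.1 == c)).map (·.2) := by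
    intro c
    rw [hD, show qs.foldl (fun cats kv => cats.modify (nameOf kv.2) [] (fun l => l ++ [kv.1])) initCats = (qs.map (fun kv => (nameOf kv.2, kv.1))).foldl (fun d p => d.modify p.1 [] (fun l => l ++ [p.2])) initCats from (List.foldl_map (f := fun (kv : String × Int) => (nameOf kv.2, kv.1)) (g := fun (d : PySem.Dict String (List String)) (p : String × String) => d.modify p.1 [] (fun l => l ++ [p.2]))).symm]
    exact PySem.Dict.getD_foldl_modify_append _ _ _
  have hfilt : ∀ c : String,
      ((qs.map (fun kv => (nameOf kv.2, kv.1))).filter (fun p => p.1 == c)).map (·.2)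
      = (qs.filter (fun kv => catsMapB.getD kv.2 "" == c)).map (·.1) := by
    intro c
    rw [List.filter_map, List.map_map]
    congr 1
    apply List.filter_congr
    intro kv hkv
    have h := get?_catsMapB kv.2 (hpre kv hkv)
    simp [PySem.Dict.getD_eq_get?_getD, h]
  have hkl : initCats.keys = ["most popular", "popular", "common", "long tail"] := by decide
  have hvl : catsMapB.values = ["most popular", "popular", "common", "long tail"] := by decide
  rw [PySem.Dict.items_eq_map_keys D hnd [], hkeys, hkl, hvl]
  simp only [List.map_cons, List.map_nil, hgetD]
  rw [hfilt "most popular", hfilt "popular", hfilt "common", hfilt "long tail"]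
  simp [initCats, PySem.Dict.getD, PySem.Dict.get?]
  decide

-- ===== VERDICT (by name: the statement is the Claim_ definition above) =====
theorem popularity_spec : Claim_equal_popularity := by
  intro qs _ hpre
  unfold Spec_popularity popularity popularity_alt
  exact popularity_main qs hpre
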